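-- pv_equiv track=rewrite | github.com/zeckhardt/advent_of_code | day8.py | check_down
-- ===== SOURCE A (Python) =====
-- def check_down(x, y , trees, deep):
--     down = x + deep
--     if trees[down][y] < trees[x][y]:
--         if down == 4:
--             return True
--         else:
--             return check_down(x, y, trees, deep + 1)
--     else:
--         return False
-- ===== SOURCE B (Python) =====
-- def check_down(x, y, trees, deep):
--     height = trees[x][y]
--     return all(trees[d][y] < height for d in range(x + deep, 5))
-- ===== Notes on version B (the rewrite author's own statement) =====
-- stated objective: idiomatic
-- what changed: Replaces the self-recursive descent by a single short-circuiting all() over range(x+deep, 5) with the reference height trees[x][y] hoisted out.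
-- outside the precondition, e.g. on check_down(6, 0, [[0], [0], [0], [0], [0], [0], [0]], 0): A returns False, B returns True
import Mathlib
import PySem

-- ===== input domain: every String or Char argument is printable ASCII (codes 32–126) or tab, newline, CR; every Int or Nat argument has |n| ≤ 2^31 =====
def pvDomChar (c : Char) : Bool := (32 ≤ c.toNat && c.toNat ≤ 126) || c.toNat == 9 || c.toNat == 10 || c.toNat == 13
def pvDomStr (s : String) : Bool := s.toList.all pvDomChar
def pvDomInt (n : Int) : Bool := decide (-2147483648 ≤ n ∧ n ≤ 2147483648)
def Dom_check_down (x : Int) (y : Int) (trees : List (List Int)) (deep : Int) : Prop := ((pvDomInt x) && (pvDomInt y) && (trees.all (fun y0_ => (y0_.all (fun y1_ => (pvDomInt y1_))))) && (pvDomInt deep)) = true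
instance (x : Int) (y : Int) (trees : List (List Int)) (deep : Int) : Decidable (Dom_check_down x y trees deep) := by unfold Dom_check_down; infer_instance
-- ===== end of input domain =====

-- B replaces A's self-recursive descent by a single all() over range(x+deep, 5) with the
-- reference height trees[x][y] hoisted out; equivalence is about the return value on Pre_
-- (inputs where A raises IndexError, and starts past the hardcoded bottom row 4, are excluded).

-- ===== PORT A =====
-- A recurses with deep+1 until trees[down][y] is not shorter or down == 4; each step that
-- recurses has a valid index down < trees.length, so (trees.length - (x+deep)).toNat + 1
-- steps always suffice (fuel is only a totality guard; on an IndexError input the port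
-- returns false, such inputs are outside Pre_).
def checkDownGo (x : Int) (y : Int) (trees : List (List Int)) : Nat → Int → Bool
  | 0, _ => false
  | f+1, deep =>
    let down := x + deep
    match PySem.List.pyGet? trees down with
    | none => false
    | some rowD =>
      match PySem.List.pyGet? rowD y with
      | none => false
      | some a =>
        match PySem.List.pyGet? trees x with
        | none => false
        | some rowX =>
          match PySem.List.pyGet? rowX y with
          | none => false
          | some b =>
            if a < b then
              (if down == 4 then true else checkDownGo x y trees f (deep+1))
            else false

def check_down (x : Int) (y : Int) (trees : List (List Int)) (deep : Int) : Bool :=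
  checkDownGo x y trees ((((trees.length : Int)) - (x + deep)).toNat + 1) deep

-- ===== PORT B =====
-- B hoists height = trees[x][y] once and takes all(trees[d][y] < height for d in range(x+deep, 5));
-- a none (Python: IndexError) counts as false here, which cannot be reached inside Pre_.
def check_down_alt (x : Int) (y : Int) (trees : List (List Int)) (deep : Int) : Bool :=
  match PySem.List.pyGet? trees x with
  | none => false
  | some rowX =>
    match PySem.List.pyGet? rowX y with
    | none => false
    | some height =>
      (PySem.List.pyRange (x + deep) 5 1).all (fun d =>
        match PySem.List.pyGet? trees d with
        | none => false
        | some row =>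
          match PySem.List.pyGet? row y with
          | none => false
          | some t => decide (t < height))

-- ===== PRECONDITION & SPEC =====
-- pvScmp: the comparison trees[d][y] < trees[x][y]; none iff Python raises IndexError there.
def pvScmp (x : Int) (y : Int) (trees : List (List Int)) (d : Int) : Option Bool := do
  let rowD ← PySem.List.pyGet? trees d
  let a ← PySem.List.pyGet? rowD y
  let rowX ← PySem.List.pyGet? trees x
  let b ← PySem.List.pyGet? rowX y
  return decide (a < b)

-- Pre_ excludes (i) inputs where A raises IndexError, and (ii) starts past the hardcoded bottom
-- row (x+deep > 4): there A probes trees[x+deep] on an over-sized grid and its value is an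
-- artefact of the hardcoded 5-row bound, a corner on which B's vacuous True is equally defensible.
-- Inside it, A returns True iff every comparison on x+deep..4 is valid and shorter, and False iff
-- the first non-"shorter" comparison in that descent is valid.
def pvPreB (x : Int) (y : Int) (trees : List (List Int)) (deep : Int) : Bool :=
  let s := x + deep
  if s < -(trees.length : Int) ∨ 4 < s then false
  else
    (PySem.List.pyRange s 5 1).all (fun d => pvScmp x y trees d == some true)
    || (PySem.List.pyRange s 5 1).any (fun d =>
         pvScmp x y trees d == some false &&
         (PySem.List.pyRange s d 1).all (fun d' => pvScmp x y trees d' == some true))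

def Pre_check_down (x : Int) (y : Int) (trees : List (List Int)) (deep : Int) : Prop :=
  pvPreB x y trees deep = true
instance (x : Int) (y : Int) (trees : List (List Int)) (deep : Int) : Decidable (Pre_check_down x y trees deep) := by unfold Pre_check_down; infer_instance

def pvWitness_check_down : Int × Int × List (List Int) × Int := (0, 0, [[1],[0],[0],[0],[0]], 1)

def Spec_check_down (x : Int) (y : Int) (trees : List (List Int)) (deep : Int) (out : Bool) : Prop := out = check_down_alt x y trees deep
instance (x : Int) (y : Int) (trees : List (List Int)) (deep : Int) (out : Bool) : Decidable (Spec_check_down x y trees deep out) := by unfold Spec_check_down; infer_instance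

-- ===== CLAIM =====
def Claim_equal_check_down : Prop := ∀ (x : Int) (y : Int) (trees : List (List Int)) (deep : Int), Dom_check_down x y trees deep → Pre_check_down x y trees deep → Spec_check_down x y trees deep (check_down x y trees deep)

-- ===== LEMMAS AND PROOFS =====

-- unpack a determined comparison into its four successful lookups
lemma scmp_some {x y : Int} {trees : List (List Int)} {d : Int} {r : Bool}
    (h : pvScmp x y trees d = some r) :
    ∃ rowD a rowX b, PySem.List.pyGet? trees d = some rowD ∧ PySem.List.pyGet? rowD y = some a ∧
      PySem.List.pyGet? trees x = some rowX ∧ PySem.List.pyGet? rowX y = some b ∧ r = decide (a < b) := by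
  simp only [pvScmp, Option.bind_eq_bind] at h
  rcases h1 : PySem.List.pyGet? trees d with _ | rowD <;> rw [h1] at h <;> simp at h
  rcases h2 : PySem.List.pyGet? rowD y with _ | a <;> rw [h2] at h <;> simp at h
  rcases h3 : PySem.List.pyGet? trees x with _ | rowX <;> rw [h3] at h <;> simp at h
  rcases h4 : PySem.List.pyGet? rowX y with _ | b <;> rw [h4] at h <;> simp at h
  exact ⟨rowD, a, rowX, b, rfl, h2, rfl, h4, h.symm⟩

-- one step of A's recursion when all four lookups succeed
lemma go_step {x y : Int} {trees : List (List Int)} {f : Nat} {deep : Int}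
    {rowD rowX : List Int} {a b : Int}
    (h1 : PySem.List.pyGet? trees (x + deep) = some rowD) (h2 : PySem.List.pyGet? rowD y = some a)
    (h3 : PySem.List.pyGet? trees x = some rowX) (h4 : PySem.List.pyGet? rowX y = some b) :
    checkDownGo x y trees (f+1) deep =
      (if a < b then (if x + deep == 4 then true else checkDownGo x y trees f (deep+1)) else false) := by
  simp only [checkDownGo, h1, h2, h3, h4]

-- all-shorter descent: A's recursion returns true given enough fuel
lemma go_true (x y : Int) (trees : List (List Int)) :
    ∀ (f : Nat) (deep : Int), x + deep ≤ 4 → (4 - (x + deep)).toNat < f →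
      (∀ d ∈ PySem.List.pyRange (x + deep) 5 1, pvScmp x y trees d = some true) →
      checkDownGo x y trees f deep = true := by
  intro f
  induction f with
  | zero => intro deep _ hf _; omega
  | succ f ih =>
    intro deep hs hf hall
    have hmem : x + deep ∈ PySem.List.pyRange (x + deep) 5 1 := by
      rw [PySem.List.mem_pyRange_one]; omega
    obtain ⟨rowD, a, rowX, b, h1, h2, h3, h4, hab⟩ := scmp_some (hall _ hmem)
    rw [go_step h1 h2 h3 h4, if_pos (by exact of_decide_eq_true hab.symm)]
    by_cases h4e : x + deep = 4
    · simp [h4e]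
    · rw [if_neg (by simpa using h4e)]
      apply ih (deep + 1) (by omega) (by omega)
      intro d hd
      apply hall
      rw [PySem.List.mem_pyRange_one] at hd ⊢
      omega

-- first-non-shorter descent: A's recursion returns false given enough fuel
lemma go_false (x y : Int) (trees : List (List Int)) :
    ∀ (f : Nat) (deep : Int) (d : Int), x + deep ≤ d → d ≤ 4 → (d - (x + deep)).toNat < f →
      pvScmp x y trees d = some false →
      (∀ d' ∈ PySem.List.pyRange (x + deep) d 1, pvScmp x y trees d' = some true) →
      checkDownGo x y trees f deep = false := by
  intro f
  induction f with
  | zero => intro deep d _ _ hf _ _; omega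
  | succ f ih =>
    intro deep d hsd hd4 hf hfalse hpref
    by_cases he : x + deep = d
    · obtain ⟨rowD, a, rowX, b, h1, h2, h3, h4, hab⟩ := scmp_some hfalse
      rw [go_step (he ▸ h1.symm).symm h2 h3 h4]
      rw [if_neg (by simpa using hab.symm)]
    · have hmem : x + deep ∈ PySem.List.pyRange (x + deep) d 1 := by
        rw [PySem.List.mem_pyRange_one]; omega
      obtain ⟨rowD, a, rowX, b, h1, h2, h3, h4, hab⟩ := scmp_some (hpref _ hmem)
      rw [go_step h1 h2 h3 h4, if_pos (of_decide_eq_true hab.symm)]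
      rw [if_neg (by simp; omega)]
      apply ih (deep + 1) d (by omega) hd4 (by omega) hfalse
      intro d' hd'
      apply hpref
      rw [PySem.List.mem_pyRange_one] at hd' ⊢
      omega

-- a successful lookup pins the index inside [-len, len)
lemma pyget_bounds {α : Type} (xs : List α) (i : Int) (v : α) (h : PySem.List.pyGet? xs i = some v) :
    -(xs.length : Int) ≤ i ∧ i < xs.length := by
  by_contra hc
  have hn : PySem.List.pyGet? xs i = none := by
    rw [PySem.List.pyGet?_eq_none_iff]
    simp [PySem.Raise.InRange]
    omega
  simp [h] at hn

-- all-shorter descent: B's all() is true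
lemma alt_true (x y : Int) (trees : List (List Int)) (deep : Int)
    (hs : x + deep ≤ 4)
    (hall : ∀ d ∈ PySem.List.pyRange (x + deep) 5 1, pvScmp x y trees d = some true) :
    check_down_alt x y trees deep = true := by
  have hmem : x + deep ∈ PySem.List.pyRange (x + deep) 5 1 := by
    rw [PySem.List.mem_pyRange_one]; omega
  obtain ⟨rowD, a, rowX, b, h1, h2, h3, h4, _⟩ := scmp_some (hall _ hmem)
  simp only [check_down_alt, h3, h4, List.all_eq_true]
  intro d hd
  obtain ⟨rowD', a', rowX', b', h1', h2', h3', h4', hab'⟩ := scmp_some (hall _ hd)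
  rw [h3] at h3'
  obtain rfl := Option.some.inj h3'
  rw [h4] at h4'
  obtain rfl := Option.some.inj h4'
  simp only [h1', h2']
  exact hab'.symm

-- a valid non-shorter comparison inside the range makes B's all() false
lemma alt_false (x y : Int) (trees : List (List Int)) (deep : Int) (d : Int)
    (hsd : x + deep ≤ d) (hd4 : d ≤ 4)
    (hfalse : pvScmp x y trees d = some false) :
    check_down_alt x y trees deep = false := by
  obtain ⟨rowD, a, rowX, b, h1, h2, h3, h4, hab⟩ := scmp_some hfalse
  simp only [check_down_alt, h3, h4]
  rw [List.all_eq_false]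
  refine ⟨d, ?_, ?_⟩
  · rw [PySem.List.mem_pyRange_one]; omega
  · simp only [h1, h2]
    simp [← hab]

lemma check_down_eq (x y : Int) (trees : List (List Int)) (deep : Int)
    (hpre : pvPreB x y trees deep = true) :
    check_down x y trees deep = check_down_alt x y trees deep := by
  simp only [pvPreB] at hpre
  split at hpre
  · exact absurd hpre (by simp)
  · rename_i hcond
    push_neg at hcond
    rcases Bool.or_eq_true _ _ |>.mp hpre with hall | hany
    · simp only [List.all_eq_true, beq_iff_eq] at hall
      rw [alt_true x y trees deep (by omega) hall]
      have hmem4 : (4 : Int) ∈ PySem.List.pyRange (x + deep) 5 1 := by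
        rw [PySem.List.mem_pyRange_one]; omega
      obtain ⟨rowD, _, _, _, h1, _, _, _, _⟩ := scmp_some (hall _ hmem4)
      have hb := pyget_bounds trees 4 rowD h1
      exact go_true x y trees _ deep (by omega) (by omega) hall
    · simp only [List.any_eq_true, Bool.and_eq_true, beq_iff_eq, List.all_eq_true] at hany
      obtain ⟨d, hdmem, hfalse, hpref⟩ := hany
      rw [PySem.List.mem_pyRange_one] at hdmem
      obtain ⟨rowD, _, _, _, h1, _, _, _, _⟩ := scmp_some hfalse
      have hb := pyget_bounds trees d rowD h1
      rw [alt_false x y trees deep d (by omega) (by omega) hfalse]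
      exact go_false x y trees _ deep d (by omega) (by omega) (by omega) hfalse hpref

-- ===== VERDICT =====
theorem check_down_spec : Claim_equal_check_down := by
  intro x y trees deep _ hpre
  exact check_down_eq x y trees deep hpre
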